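-- pv_equiv track=rewrite | github.com/Alessandro727/DreamAnalyzer | aggression.py | takeLastMan
-- ===== SOURCE A (Python) =====
-- def takeLastMan(lista,char):
-- 	split_list = []
-- 	for i in range(len(lista)):
-- 		if 'he ' in lista[i].lower() or 'his ' in lista[i].lower() or 'him ' in lista[i].lower():
-- 			split_list = lista[:i]
-- 	if split_list != []:
-- 		for k in reversed(split_list):
-- 			if '1M' in k or '1I' in k and k != char:
-- 				lista.remove(lista[i])
-- 				return k
-- 	return '1MSA'
-- ===== SOURCE B (Python) =====
-- def takeLastMan(lista, char):
--     # Single forward pass with two running values, instead of A's re-slicing at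
--     # every pronoun hit plus a reversed scan of the final prefix:
--     #   best = rightmost element so far satisfying the '1M'/'1I' condition,
--     #   ans  = value of best at the most recent pronoun hit.
--     # (A also removes an element from lista before a successful return; this
--     # re-implementation does not mutate its argument.)
--     ans = None
--     best = None
--     for s in lista:
--         t = s.lower()
--         if 'he ' in t or 'his ' in t or 'him ' in t:
--             ans = best
--         if '1M' in s or ('1I' in s and s != char):
--             best = s
--     return ans if ans is not None else '1MSA'
-- ===== Notes on version B (the rewrite author's own statement) =====
-- stated objective: alternative
-- what changed: B is a single forward pass carrying two running values (the rightmost '1M'/'1I' match so far, and its value at the most recent pronoun hit), replacing A's re-slicing of lista[:i] at every pronoun hit and its reversed scan of the final prefix; B does not mutate lista (return value only is claimed). On the timing inputs the two cost the same (A's slices are rarely triggered there), so no speed is claimed.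
import Mathlib
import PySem

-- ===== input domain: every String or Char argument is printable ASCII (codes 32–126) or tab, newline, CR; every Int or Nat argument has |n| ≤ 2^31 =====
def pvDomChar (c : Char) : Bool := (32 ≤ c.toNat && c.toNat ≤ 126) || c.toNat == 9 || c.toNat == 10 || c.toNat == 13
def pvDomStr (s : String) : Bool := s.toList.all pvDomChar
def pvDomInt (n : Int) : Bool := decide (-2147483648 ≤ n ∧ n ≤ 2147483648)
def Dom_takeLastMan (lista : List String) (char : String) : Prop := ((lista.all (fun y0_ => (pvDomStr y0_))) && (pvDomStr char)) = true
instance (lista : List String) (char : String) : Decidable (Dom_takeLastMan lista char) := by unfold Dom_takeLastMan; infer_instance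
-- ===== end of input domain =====

-- B replaces A's repeated lista[:i] slicing + reversed-prefix scan by ONE forward pass
-- carrying two running values (rightmost condition-match so far, and its value at the most
-- recent pronoun hit); A also removes an element from lista before a successful return —
-- only the RETURN VALUE is modelled and proved equal here (B does not mutate).


-- ===== PORT A =====
-- the two substring tests appearing verbatim in both Python versions
def pvHit (s : String) : Bool :=
  PySem.Str.isIn "he " (PySem.Str.lower s) || PySem.Str.isIn "his " (PySem.Str.lower s) ||
    PySem.Str.isIn "him " (PySem.Str.lower s)

def pvCond (k char : String) : Bool :=
  PySem.Str.isIn "1M" k || (PySem.Str.isIn "1I" k && k != char)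

-- A's inner loop: 'for k in reversed(split_list): if …: return k'
def pvFirstMatch (char : String) : List String → Option String
  | [] => none
  | k :: rest => if pvCond k char then some k else pvFirstMatch char rest

def takeLastMan (lista : List String) (char : String) : String :=
  let split_list :=
    (PySem.List.pyRange 0 (PySem.List.len lista) 1).foldl
      (fun acc i =>
        if pvHit (PySem.List.pyGetD lista i "") then PySem.List.slice lista none (some i)
        else acc)
      []
  if split_list ≠ [] then
    match pvFirstMatch char split_list.reverse with
    | some k => k
    | none => "1MSA"
  else "1MSA"

-- ===== PORT B =====
-- B's single pass: state (ans, best)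
def takeLastMan_alt (lista : List String) (char : String) : String :=
  let st := lista.foldl
    (fun (st : Option String × Option String) s =>
      ((if pvHit s then st.2 else st.1),
       (if pvCond s char then some s else st.2)))
    (none, none)
  match st.1 with
  | some k => k
  | none => "1MSA"

-- ===== PRECONDITION & SPEC =====
def Spec_takeLastMan (lista : List String) (char : String) (out : String) : Prop := out = takeLastMan_alt lista char
instance (lista : List String) (char : String) (out : String) : Decidable (Spec_takeLastMan lista char out) := by unfold Spec_takeLastMan; infer_instance

-- ===== CLAIM (what is proved, stated in full; the proofs are below) =====
def Claim_equal_takeLastMan : Prop := ∀ (lista : List String) (char : String), Dom_takeLastMan lista char → Spec_takeLastMan lista char (takeLastMan lista char)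

-- ===== LEMMAS AND PROOFS =====

-- the index of the last pronoun hit (0 when none, like A's fold started at 0)
def pvCutNat (l : List String) : Nat :=
  l.zipIdx.foldl (fun c p => if pvHit p.1 then p.2 else c) 0

theorem pvCutNat_append (l : List String) (x : String) :
    pvCutNat (l ++ [x]) = if pvHit x then l.length else pvCutNat l := by
  simp [pvCutNat, List.zipIdx_append, List.foldl_append]

theorem pvCutNat_le (l : List String) : pvCutNat l ≤ l.length := by
  induction l using List.reverseRecOn with
  | nil => simp [pvCutNat]
  | append_singleton l x ih =>
    rw [pvCutNat_append]
    simp only [List.length_append, List.length_cons, List.length_nil]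
    split <;> omega

-- B's fold invariant: second component = rightmost cond-match, first = its value at last hit
theorem pvFoldB_inv (char : String) (l : List String) :
    l.foldl
      (fun (st : Option String × Option String) s =>
        ((if pvHit s then st.2 else st.1),
         (if pvCond s char then some s else st.2)))
      (none, none)
    = (pvFirstMatch char (l.take (pvCutNat l)).reverse, pvFirstMatch char l.reverse) := by
  induction l using List.reverseRecOn with
  | nil => simp [pvCutNat, pvFirstMatch]
  | append_singleton l x ih =>
    rw [List.foldl_append, ih, pvCutNat_append]
    simp only [List.foldl_cons, List.foldl_nil]
    have hrev : (l ++ [x]).reverse = x :: l.reverse := by simp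
    by_cases hx : pvHit x
    · rw [if_pos hx, if_pos hx, show (l ++ [x]).take l.length = l from by simp, hrev]
      simp only [pvFirstMatch]
    · rw [if_neg hx, if_neg hx, List.take_append_of_le_length (pvCutNat_le l), hrev]
      simp only [pvFirstMatch]

-- A's prefix-accumulating fold is the take of the index fold
theorem pvFold_linked (lista : List String) :
    ∀ (idx : List Int) (c0 : Int), 0 ≤ c0 → (∀ i ∈ idx, 0 ≤ i) →
      idx.foldl
        (fun acc i =>
          if pvHit (PySem.List.pyGetD lista i "") then PySem.List.slice lista none (some i)
          else acc)
        (PySem.List.slice lista none (some c0))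
      = PySem.List.slice lista none
          (some (idx.foldl (fun c j => if pvHit (PySem.List.pyGetD lista j "") then j else c) c0)) := by
  intro idx
  induction idx with
  | nil => intro c0 _ _; rfl
  | cons i rest ih =>
    intro c0 h0 hmem
    simp only [List.foldl_cons]
    by_cases h : pvHit (PySem.List.pyGetD lista i "") = true
    · simp only [h, if_true]
      exact ih i (hmem i List.mem_cons_self) (fun j hj => hmem j (List.mem_cons_of_mem _ hj))
    · simp only [h]
      exact ih c0 h0 (fun j hj => hmem j (List.mem_cons_of_mem _ hj))

-- A's Int index fold computes pvCutNat
theorem pvIntFold_eq_cutNat (l : List String) :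
    (PySem.List.pyRange 0 (PySem.List.len l) 1).foldl
      (fun c j => if pvHit (PySem.List.pyGetD l j "") then j else c) 0
    = (pvCutNat l : Int) := by
  induction l using List.reverseRecOn with
  | nil => simp [pvCutNat, PySem.List.pyRange_one_eq_nil]
  | append_singleton l x ih =>
    have hlen : PySem.List.len (l ++ [x]) = PySem.List.len l + 1 := by
      simp [PySem.List.len_eq]
    have hsplit : PySem.List.pyRange 0 (PySem.List.len l + 1) 1
        = PySem.List.pyRange 0 (PySem.List.len l) 1 ++ [PySem.List.len l] := by
      exact PySem.List.pyRange_one_succ_right (by rw [PySem.List.len_eq]; positivity)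
    rw [hlen, hsplit, List.foldl_append]
    have hcongr :
        (PySem.List.pyRange 0 (PySem.List.len l) 1).foldl
          (fun c j => if pvHit (PySem.List.pyGetD (l ++ [x]) j "") then j else c) 0
        = (PySem.List.pyRange 0 (PySem.List.len l) 1).foldl
          (fun c j => if pvHit (PySem.List.pyGetD l j "") then j else c) 0 := by
      apply PySem.List.foldl_congr_mem
      intro acc j hj
      obtain ⟨h0, h1⟩ := (PySem.List.mem_pyRange_one).1 hj
      rw [PySem.List.len_eq] at h1
      obtain ⟨k, rfl⟩ : ∃ k : Nat, j = (k : Int) := ⟨j.toNat, (Int.toNat_of_nonneg h0).symm⟩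
      have hk : k < l.length := by exact_mod_cast h1
      rw [PySem.List.pyGetD_natCast, PySem.List.pyGetD_natCast,
        List.getD_eq_getElem _ _ (by simp; omega), List.getD_eq_getElem _ _ hk]
      simp [List.getElem_append_left hk]
    rw [hcongr, ih]
    simp only [List.foldl_cons, List.foldl_nil]
    have hget : PySem.List.pyGetD (l ++ [x]) (PySem.List.len l) "" = x := by
      rw [PySem.List.len_eq, PySem.List.pyGetD_natCast]
      simp
    rw [hget, pvCutNat_append]
    split <;> simp [PySem.List.len_eq]

-- ===== VERDICT (by name: the statement is the Claim_ definition above) =====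
theorem takeLastMan_spec : Claim_equal_takeLastMan := by
  intro lista char _
  show takeLastMan lista char = takeLastMan_alt lista char
  have hmem : ∀ i ∈ PySem.List.pyRange 0 (PySem.List.len lista) 1, 0 ≤ i := by
    intro i hi
    exact ((PySem.List.mem_pyRange_one).1 hi).1
  -- A = F (pvCutNat lista)
  have key := pvFold_linked lista (PySem.List.pyRange 0 (PySem.List.len lista) 1) 0
    le_rfl hmem
  rw [show PySem.List.slice lista none (some (0 : Int)) = [] from by
      simpa using PySem.List.slice_to_natCast lista 0] at key
  rw [pvIntFold_eq_cutNat, PySem.List.slice_to_natCast] at key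
  have hA : takeLastMan lista char =
      (match pvFirstMatch char (lista.take (pvCutNat lista)).reverse with
        | some k => k
        | none => "1MSA") := by
    simp only [takeLastMan]
    rw [key]
    by_cases hne : lista.take (pvCutNat lista) = []
    · rw [if_neg (by simp [hne]), hne]
      simp [pvFirstMatch]
    · rw [if_pos hne]
  rw [hA]
  simp only [takeLastMan_alt]
  rw [pvFoldB_inv]
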